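-- pv_equiv track=rewrite | github.com/nicksphone/Magic-the-gathering-deck-testing-with-ai-oppent | ai_player.py | parse_mana_cost
-- ===== SOURCE A (Python) =====
-- from typing import List, Dict, Optional
--
-- def parse_mana_cost(mana_cost: str) -> Dict[str, int]:
--     """Parse mana cost string into dictionary"""
--     cost = {'W': 0, 'U': 0, 'B': 0, 'R': 0, 'G': 0, 'C': 0}
--     if not mana_cost:
--         return cost
--
--     # Handle generic mana
--     generic = ''.join(filter(str.isdigit, mana_cost))
--     if generic:
--         cost['C'] = int(generic)
--
--     # Handle colored mana
--     for color in 'WUBRG':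
--         cost[color] = mana_cost.count('{' + color + '}')
--
--     return cost
-- ===== SOURCE B (Python) =====
-- def parse_mana_cost(mana_cost: str):
--     """Parse mana cost string into dictionary (single left-to-right pass)."""
--     w = u = b = r = g = 0
--     digits = ''
--     n = len(mana_cost)
--     i = 0
--     while i < n:
--         ch = mana_cost[i]
--         if ch.isdigit():
--             digits += ch
--         elif ch == '{' and i + 2 < n and mana_cost[i + 2] == '}':
--             c2 = mana_cost[i + 1]
--             if c2 == 'W':
--                 w += 1
--             elif c2 == 'U':
--                 u += 1
--             elif c2 == 'B':
--                 b += 1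
--             elif c2 == 'R':
--                 r += 1
--             elif c2 == 'G':
--                 g += 1
--         i += 1
--     return {'W': w, 'U': u, 'B': b, 'R': r, 'G': g,
--             'C': int(digits) if digits else 0}
-- ===== Notes on version B (the rewrite author's own statement) =====
-- stated objective: alternative
-- what changed: Replaces A's six separate scans (a filter for digits plus five substring .count passes into a dict) by one left-to-right state-machine pass that accumulates the digit string and the five colour counters simultaneously and builds the result dict once at the end.
import Mathlib
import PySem

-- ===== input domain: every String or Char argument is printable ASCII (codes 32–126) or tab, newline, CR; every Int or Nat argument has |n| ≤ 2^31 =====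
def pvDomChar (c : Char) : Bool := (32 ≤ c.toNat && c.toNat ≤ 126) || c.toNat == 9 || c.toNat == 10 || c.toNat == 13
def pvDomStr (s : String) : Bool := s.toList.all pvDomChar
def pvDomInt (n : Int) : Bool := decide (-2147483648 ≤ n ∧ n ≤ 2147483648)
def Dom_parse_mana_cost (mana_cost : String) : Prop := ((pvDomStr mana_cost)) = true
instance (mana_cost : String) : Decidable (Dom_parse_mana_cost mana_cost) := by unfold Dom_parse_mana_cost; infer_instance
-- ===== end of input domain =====

-- B replaces A's six scans of the string (one digit filter + five substring counts) by a single
-- left-to-right pass; objective: alternative (same cost class, one traversal).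

-- ===== PORT A =====
def parse_mana_cost (mana_cost : String) : List (String × Int) :=
  let cost : PySem.Dict String Int :=
    ((((((PySem.Dict.empty.insert "W" 0).insert "U" 0).insert "B" 0).insert "R" 0).insert "G" 0).insert "C" 0)
  if mana_cost.toList.isEmpty then cost.items
  else
    -- generic = ''.join(filter(str.isdigit, mana_cost))
    let generic : List Char := mana_cost.toList.filter PySem.Chars.isdigit
    -- if generic: cost['C'] = int(generic)  (generic is a nonempty digit string, so int() returns; the getD 0 default is unreachable)
    let cost1 := if generic.isEmpty then cost else cost.insert "C" ((PySem.Int.ofChars? generic).getD 0)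
    -- for color in 'WUBRG': cost[color] = mana_cost.count('{' + color + '}')
    let cost2 := ['W', 'U', 'B', 'R', 'G'].foldl
      (fun d c => d.insert (String.ofList [c]) ((PySem.Chars.count mana_cost.toList ['{', c, '}'] : Int))) cost1
    cost2.items

-- ===== PORT B =====
-- one pass: digit-string accumulator + five colour counters; the Python lookahead
-- 'mana_cost[i+1], mana_cost[i+2]' is the pattern match on the (unconsumed) tail
def pmcScan : List Char → List Char → Int → Int → Int → Int → Int → (List Char × Int × Int × Int × Int × Int)
  | [], ds, w, u, b, r, g => (ds, w, u, b, r, g)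
  | ch :: rest, ds, w, u, b, r, g =>
    if PySem.Chars.isdigit ch then pmcScan rest (ds ++ [ch]) w u b r g
    else if ch = '{' then
      match rest with
      | c2 :: '}' :: _ =>
        if c2 = 'W' then pmcScan rest ds (w + 1) u b r g
        else if c2 = 'U' then pmcScan rest ds w (u + 1) b r g
        else if c2 = 'B' then pmcScan rest ds w u (b + 1) r g
        else if c2 = 'R' then pmcScan rest ds w u b (r + 1) g
        else if c2 = 'G' then pmcScan rest ds w u b r (g + 1)
        else pmcScan rest ds w u b r g
      | _ => pmcScan rest ds w u b r g
    else pmcScan rest ds w u b r g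

def parse_mana_cost_alt (mana_cost : String) : List (String × Int) :=
  match pmcScan mana_cost.toList [] 0 0 0 0 0 with
  | (ds, w, u, b, r, g) =>
    [("W", w), ("U", u), ("B", b), ("R", r), ("G", g),
     ("C", if ds.isEmpty then 0 else (PySem.Int.ofChars? ds).getD 0)]

-- ===== PRECONDITION & SPEC =====
def Spec_parse_mana_cost (mana_cost : String) (out : List (String × Int)) : Prop := out = parse_mana_cost_alt mana_cost
instance (mana_cost : String) (out : List (String × Int)) : Decidable (Spec_parse_mana_cost mana_cost out) := by unfold Spec_parse_mana_cost; infer_instance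

-- ===== CLAIM (what is proved, stated in full; the proofs are below) =====
def Claim_equal_parse_mana_cost : Prop := ∀ (mana_cost : String), Dom_parse_mana_cost mana_cost → Spec_parse_mana_cost mana_cost (parse_mana_cost mana_cost)

-- ===== LEMMAS AND PROOFS =====

-- number of positions where '{c}' matches; for c ≠ '{' occurrences of '{c}' cannot overlap,
-- so this equals Python's non-overlapping str.count (count_eq_braceCnt below)
def braceCnt (c : Char) : List Char → Nat
  | [] => 0
  | h :: t => (if List.isPrefixOf ['{', c, '}'] (h :: t) then 1 else 0) + braceCnt c t

theorem count_go_eq (c : Char) (hc : c ≠ '{') :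
    ∀ (fuel : Nat) (l : List Char) (acc : Nat), l.length ≤ fuel →
      PySem.Chars.count.go ['{', c, '}'] fuel l acc = acc + braceCnt c l := by
  intro fuel
  induction fuel with
  | zero =>
    intro l acc hl
    have : l = [] := by cases l <;> simp_all
    subst this; simp [PySem.Chars.count.go, braceCnt]
  | succ fuel ih =>
    intro l acc hl
    cases l with
    | nil => simp [PySem.Chars.count.go, braceCnt]
    | cons h t =>
      by_cases hp : List.isPrefixOf ['{', c, '}'] (h :: t) = true
      · obtain ⟨rfl, t', rfl⟩ : h = '{' ∧ ∃ t', t = c :: '}' :: t' := by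
          rw [List.isPrefixOf_iff_prefix] at hp
          obtain ⟨s, hs⟩ := hp
          simp at hs
          exact ⟨hs.1.symm, s, hs.2.symm⟩
        rw [PySem.Chars.count.go]
        simp only [hp, if_pos]
        rw [ih _ _ (by simp at hl ⊢; omega)]
        have h1 : (('{' : Char) == c) = false := by
          simp [beq_eq_false_iff_ne]; exact fun h => hc h.symm
        have h2 : (('{' : Char) == '}') = false := by decide
        simp [braceCnt, List.isPrefixOf, h1, h2]
        omega
      · rw [PySem.Chars.count.go]
        simp only [hp]
        rw [ih _ _ (by simp at hl ⊢; omega)]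
        simp [braceCnt, hp]
        exact ih _ _ (by simp at hl ⊢; omega)

theorem count_eq_braceCnt (c : Char) (hc : c ≠ '{') (l : List Char) :
    PySem.Chars.count l ['{', c, '}'] = braceCnt c l := by
  rw [PySem.Chars.count]
  simp
  rw [count_go_eq c hc l.length l 0 le_rfl]
  omega

theorem pmcScan_spec :
    ∀ (l ds : List Char) (w u b r g : Int),
      pmcScan l ds w u b r g =
        (ds ++ l.filter PySem.Chars.isdigit,
         w + (braceCnt 'W' l : Int), u + (braceCnt 'U' l : Int), b + (braceCnt 'B' l : Int),
         r + (braceCnt 'R' l : Int), g + (braceCnt 'G' l : Int)) := by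
  intro l
  induction l with
  | nil => intro ds w u b r g; simp [pmcScan, braceCnt]
  | cons ch rest ih =>
    intro ds w u b r g
    rw [pmcScan.eq_def]; simp only []
    by_cases hd : PySem.Chars.isdigit ch = true
    · have hne : (('{' : Char) == ch) = false := by
        have : ch ≠ '{' := by
          intro h; subst h
          simp [PySem.Chars.isdigit] at hd
        simp [beq_eq_false_iff_ne]; exact fun h => this h.symm
      rw [if_pos hd, ih]
      simp [braceCnt, List.isPrefixOf, hne, hd]
    · rw [if_neg hd]
      by_cases hb : ch = '{'
      · subst hb
        rw [if_pos rfl]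
        split
        next c2 t =>
          by_cases h1 : c2 = 'W'
          · subst h1; rw [if_pos rfl, ih]
            simp [braceCnt, List.isPrefixOf, hd]
            omega
          rw [if_neg h1]
          by_cases h2 : c2 = 'U'
          · subst h2; rw [if_pos rfl, ih]
            simp [braceCnt, List.isPrefixOf, hd]
            omega
          rw [if_neg h2]
          by_cases h3 : c2 = 'B'
          · subst h3; rw [if_pos rfl, ih]
            simp [braceCnt, List.isPrefixOf, hd]
            omega
          rw [if_neg h3]
          by_cases h4 : c2 = 'R'
          · subst h4; rw [if_pos rfl, ih]
            simp [braceCnt, List.isPrefixOf, hd]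
            omega
          rw [if_neg h4]
          by_cases h5 : c2 = 'G'
          · subst h5; rw [if_pos rfl, ih]
            simp [braceCnt, List.isPrefixOf, hd]
            omega
          rw [if_neg h5, ih]
          have e1 : (('W' : Char) == c2) = false := by simp [beq_eq_false_iff_ne]; exact fun h => h1 h.symm
          have e2 : (('U' : Char) == c2) = false := by simp [beq_eq_false_iff_ne]; exact fun h => h2 h.symm
          have e3 : (('B' : Char) == c2) = false := by simp [beq_eq_false_iff_ne]; exact fun h => h3 h.symm
          have e4 : (('R' : Char) == c2) = false := by simp [beq_eq_false_iff_ne]; exact fun h => h4 h.symm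
          have e5 : (('G' : Char) == c2) = false := by simp [beq_eq_false_iff_ne]; exact fun h => h5 h.symm
          simp [braceCnt, List.isPrefixOf, hd, e1, e2, e3, e4, e5]
        next hno =>
          have hp : ∀ c : Char, List.isPrefixOf ['{', c, '}'] ('{' :: rest) = false := by
            intro c
            by_contra hcon
            rw [Bool.not_eq_false, List.isPrefixOf_iff_prefix] at hcon
            obtain ⟨s, hs⟩ := hcon
            simp at hs
            exact hno c s hs.symm
          rw [ih]
          simp [braceCnt, hd, hp]
      · rw [if_neg hb, ih]
        have hne : (('{' : Char) == ch) = false := by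
          simp [beq_eq_false_iff_ne]; exact fun h => hb h.symm
        simp [braceCnt, List.isPrefixOf, hne, hd]

theorem ports_agree : ∀ (mana_cost : String), parse_mana_cost mana_cost = parse_mana_cost_alt mana_cost := by
  intro m
  have k1 : String.ofList ['W'] = "W" := rfl
  have k2 : String.ofList ['U'] = "U" := rfl
  have k3 : String.ofList ['B'] = "B" := rfl
  have k4 : String.ofList ['R'] = "R" := rfl
  have k5 : String.ofList ['G'] = "G" := rfl
  rw [parse_mana_cost, parse_mana_cost_alt, pmcScan_spec]
  by_cases he : m.toList.isEmpty = true
  · rw [if_pos he]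
    have : m.toList = [] := by simpa [List.isEmpty_iff] using he
    rw [this]
    simp [PySem.Dict.insert, PySem.Dict.empty, braceCnt]
  · rw [if_neg he]
    by_cases hg : (m.toList.filter PySem.Chars.isdigit).isEmpty = true
    · simp [PySem.Dict.insert, PySem.Dict.empty, hg, k1, k2, k3, k4, k5,
        count_eq_braceCnt 'W' (by decide), count_eq_braceCnt 'U' (by decide),
        count_eq_braceCnt 'B' (by decide), count_eq_braceCnt 'R' (by decide),
        count_eq_braceCnt 'G' (by decide)]
    · simp [PySem.Dict.insert, PySem.Dict.empty, hg, k1, k2, k3, k4, k5,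
        count_eq_braceCnt 'W' (by decide), count_eq_braceCnt 'U' (by decide),
        count_eq_braceCnt 'B' (by decide), count_eq_braceCnt 'R' (by decide),
        count_eq_braceCnt 'G' (by decide)]

-- ===== VERDICT (by name: the statement is the Claim_ definition above) =====
theorem parse_mana_cost_spec : Claim_equal_parse_mana_cost := by
  intro m _
  exact ports_agree m
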